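-- pv_equiv track=rewrite | github.com/doocs/leetcode | solution/1900-1999/1989.Maximum Number of People That Can Be Caught in Tag/Solution.py | catchMaximumAmountofPeople
-- ===== SOURCE A (Python) =====
-- from typing import List
--
-- def catchMaximumAmountofPeople(team: List[int], dist: int) -> int:
--     ans = j = 0
--     n = len(team)
--     for i, x in enumerate(team):
--         if x:
--             while j < n and (team[j] or i - j > dist):
--                 j += 1
--             if j < n and abs(i - j) <= dist:
--                 ans += 1
--                 j += 1
--     return ans
-- ===== SOURCE B (Python) =====
-- from typing import List
--
-- def catchMaximumAmountofPeople(team: List[int], dist: int) -> int: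
--     # One streaming pass: keep a FIFO queue of indices of so-far-unmatched
--     # elements (they are always all of the same kind).  At each index, expire
--     # queue entries out of reach, then either match the new element with the
--     # queue head (if kinds differ) or enqueue it.
--     cnt = head = 0
--     pending = []          # pending[head:] = live unmatched indices, all of `kind`
--     kind = False          # kind of the live pending entries (True = catcher)
--     for i, x in enumerate(team):
--         while head < len(pending) and pending[head] < i - dist:
--             head += 1
--         cur = x != 0
--         if head < len(pending) and cur != kind:
--             head += 1
--             cnt += 1
--         else:
--             pending.append(i)
--             kind = cur
--     return cnt
-- ===== Notes on version B (the rewrite author's own statement) =====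
-- stated objective: alternative
-- what changed: A iterates over catchers with a nested people-pointer scan; B makes one streaming pass over all indices maintaining an expiring FIFO queue of unmatched same-kind indices, matching each arriving element against the queue head of the opposite kind.
import Mathlib
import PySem

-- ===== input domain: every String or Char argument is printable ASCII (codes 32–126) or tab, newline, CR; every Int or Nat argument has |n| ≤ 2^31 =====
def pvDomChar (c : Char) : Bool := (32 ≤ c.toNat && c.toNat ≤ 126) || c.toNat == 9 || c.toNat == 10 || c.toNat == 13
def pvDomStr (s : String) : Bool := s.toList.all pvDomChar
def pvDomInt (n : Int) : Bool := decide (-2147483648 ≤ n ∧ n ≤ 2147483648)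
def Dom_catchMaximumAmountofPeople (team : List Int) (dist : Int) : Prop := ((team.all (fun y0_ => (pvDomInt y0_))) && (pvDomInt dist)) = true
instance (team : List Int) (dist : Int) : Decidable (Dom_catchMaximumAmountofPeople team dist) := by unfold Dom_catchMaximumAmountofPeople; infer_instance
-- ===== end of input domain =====

-- B replaces A's catcher loop with nested people-pointer scan by a single streaming
-- pass keeping an expiring FIFO queue of unmatched same-kind indices (alternative, same cost).

-- ===== PORT A =====
-- inner `while j < n and (team[j] or i - j > dist): j += 1`
def skipA (team : List Int) (dist : Int) (i : Int) (j : Nat) : Nat :=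
  if _h : j < team.length then
    if team.getD j 0 ≠ 0 ∨ i - (j : Int) > dist then skipA team dist i (j + 1) else j
  else j
termination_by team.length - j

-- `for i, x in enumerate(team)` with state (j, ans)
def loopA (team : List Int) (dist : Int) : List Int → Int → Nat → Int → Int
  | [], _, _, ans => ans
  | x :: rest, i, j, ans =>
    if x ≠ 0 then
      if skipA team dist i j < team.length ∧ |i - (skipA team dist i j : Int)| ≤ dist then
        loopA team dist rest (i + 1) (skipA team dist i j + 1) (ans + 1)
      else
        loopA team dist rest (i + 1) (skipA team dist i j) ans
    else loopA team dist rest (i + 1) j ans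

def catchMaximumAmountofPeople (team : List Int) (dist : Int) : Int :=
  loopA team dist team 0 0 0

-- ===== PORT B =====
-- `while head < len(pending) and pending[head] < i - dist: head += 1`
-- (the queue is modelled as its live part pending[head:]; popping = dropping the head)
def dropExpired : List Int → Int → List Int
  | [], _ => []
  | h :: t, lim => if h < lim then dropExpired t lim else h :: t

-- the `for i, x in enumerate(team)` pass with state (cnt, pending queue, kind)
def loopB (dist : Int) : List Int → Int → Int → List Int → Bool → Int
  | [], _, cnt, _, _ => cnt
  | x :: rest, i, cnt, pend, kd =>
    match dropExpired pend (i - dist) with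
    | [] => loopB dist rest (i + 1) cnt [i] (x != 0)
    | q :: t =>
      if (x != 0) ≠ kd then loopB dist rest (i + 1) (cnt + 1) t kd
      else loopB dist rest (i + 1) cnt ((q :: t) ++ [i]) kd

def catchMaximumAmountofPeople_alt (team : List Int) (dist : Int) : Int :=
  loopB dist team 0 0 [] false

-- ===== PRECONDITION & SPEC =====
def Spec_catchMaximumAmountofPeople (team : List Int) (dist : Int) (out : Int) : Prop := out = catchMaximumAmountofPeople_alt team dist
instance (team : List Int) (dist : Int) (out : Int) : Decidable (Spec_catchMaximumAmountofPeople team dist out) := by unfold Spec_catchMaximumAmountofPeople; infer_instance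

-- ===== CLAIM (what is proved, stated in full; the proofs are below) =====
def Claim_equal_catchMaximumAmountofPeople : Prop := ∀ (team : List Int) (dist : Int), Dom_catchMaximumAmountofPeople team dist → Spec_catchMaximumAmountofPeople team dist (catchMaximumAmountofPeople team dist)

-- ===== LEMMAS AND PROOFS =====
-- Both ports are proved equal to a common reference count `mergeB` over the extracted
-- sorted index lists of people (P) and catchers (C).

def pplAux : List Int → Int → List Int
  | [], _ => []
  | x :: t, k => if x = 0 then k :: pplAux t (k + 1) else pplAux t (k + 1)

def ctchAux : List Int → Int → List Int
  | [], _ => []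
  | x :: t, k => if x ≠ 0 then k :: ctchAux t (k + 1) else ctchAux t (k + 1)

def mergeB (dist : Int) : List Int → List Int → Int
  | [], _ => 0
  | _ :: _, [] => 0
  | q :: ps, c :: cs =>
    if q < c - dist then mergeB dist ps (c :: cs)
    else if q > c + dist then mergeB dist (q :: ps) cs
    else 1 + mergeB dist ps cs
termination_by ps cs => ps.length + cs.length

-- people indices ≥ j, catcher indices ≥ k (as absolute indices)
def P (team : List Int) (j : Nat) : List Int := pplAux (team.drop j) (j : Int)
def C (team : List Int) (k : Nat) : List Int := ctchAux (team.drop k) (k : Int)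

theorem mergeB_nil_left (dist : Int) (l : List Int) : mergeB dist [] l = 0 := by rw [mergeB]

theorem mergeB_nil_right (dist : Int) (ps : List Int) : mergeB dist ps [] = 0 := by
  cases ps <;> rw [mergeB]

theorem mergeB_cons (dist q c : Int) (ps cs : List Int) :
    mergeB dist (q :: ps) (c :: cs) =
      if q < c - dist then mergeB dist ps (c :: cs)
      else if q > c + dist then mergeB dist (q :: ps) cs
      else 1 + mergeB dist ps cs := by rw [mergeB]

theorem P_cons (team : List Int) (j : Nat) (h : j < team.length) :
    P team j = if team.getD j 0 = 0 then (j : Int) :: P team (j + 1) else P team (j + 1) := by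
  simp only [P]
  rw [List.drop_eq_getElem_cons h, pplAux, List.getD_eq_getElem team 0 h]
  push_cast
  rfl

theorem C_cons (team : List Int) (k : Nat) (h : k < team.length) :
    C team k = if team.getD k 0 ≠ 0 then (k : Int) :: C team (k + 1) else C team (k + 1) := by
  simp only [C]
  rw [List.drop_eq_getElem_cons h, ctchAux, List.getD_eq_getElem team 0 h]
  push_cast
  rfl

theorem P_end (team : List Int) (j : Nat) (h : team.length ≤ j) : P team j = [] := by
  unfold P
  rw [List.drop_eq_nil_of_le h]
  rfl

theorem C_end (team : List Int) (k : Nat) (h : team.length ≤ k) : C team k = [] := by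
  unfold C
  rw [List.drop_eq_nil_of_le h]
  rfl

-- the skip loop preserves the merge value against catcher head k, and stops on a
-- person within reach from the left (or at the end of the array)
theorem skip_spec (team : List Int) (dist : Int) (k : Nat) (cs : List Int) (j : Nat) :
    mergeB dist (P team j) ((k : Int) :: cs) = mergeB dist (P team (skipA team dist (k : Int) j)) ((k : Int) :: cs)
    ∧ (skipA team dist (k : Int) j < team.length →
        team.getD (skipA team dist (k : Int) j) 0 = 0 ∧ (k : Int) - (skipA team dist (k : Int) j : Int) ≤ dist) := by
  unfold skipA
  split
  · rename_i h
    split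
    · rename_i hc
      have ih := skip_spec team dist k cs (j + 1)
      refine ⟨?_, ih.2⟩
      rw [← ih.1, P_cons team j h]
      by_cases hz : team.getD j 0 = 0
      · rw [if_pos hz, mergeB_cons, if_pos (by rcases hc with hne | hfar; exact absurd hz hne; omega)]
      · rw [if_neg hz]
    · rename_i hc
      push_neg at hc
      exact ⟨rfl, fun _ => ⟨hc.1, by omega⟩⟩
  · rename_i h
    exact ⟨rfl, fun h' => absurd h' h⟩
termination_by team.length - j

-- A-side invariant: A's loop over the suffix from k with people pointer j equals ans + merge
theorem loopA_eq (team : List Int) (dist : Int) (k : Nat) (j : Nat) (ans : Int) :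
    loopA team dist (team.drop k) (k : Int) j ans = ans + mergeB dist (P team j) (C team k) := by
  have hcast : ((k : Int) + 1) = ((k + 1 : Nat) : Int) := by push_cast; ring
  by_cases h : k < team.length
  · rw [List.drop_eq_getElem_cons h, loopA, C_cons team k h]
    have hg : team[k] = team.getD k 0 := (List.getD_eq_getElem team 0 h).symm
    rw [hg]
    by_cases hx : team.getD k 0 = 0
    · rw [if_neg (fun hh => hh hx), if_neg (fun hh => hh hx), hcast]
      exact loopA_eq team dist (k + 1) j ans
    · rw [if_pos hx, if_pos hx]
      obtain ⟨hmerge, hstop⟩ := skip_spec team dist k (C team (k + 1)) j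
      set j' := skipA team dist (k : Int) j with hj'
      by_cases hlt : j' < team.length
      · obtain ⟨hz, hnear⟩ := hstop hlt
        by_cases habs : |(k : Int) - (j' : Int)| ≤ dist
        · rw [if_pos (show j' < team.length ∧ |(k : Int) - (j' : Int)| ≤ dist from ⟨hlt, habs⟩)]
          rw [hmerge, P_cons team j' hlt, if_pos hz, mergeB_cons]
          rw [if_neg (show ¬ ((j' : Int) < (k : Int) - dist) by omega)]
          rw [if_neg (show ¬ ((j' : Int) > (k : Int) + dist) by rw [abs_le] at habs; omega)]
          rw [hcast, loopA_eq team dist (k + 1) (j' + 1) (ans + 1)]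
          ring
        · rw [if_neg (show ¬ (j' < team.length ∧ |(k : Int) - (j' : Int)| ≤ dist) from fun hh => habs hh.2)]
          have hfar : ((j' : Int)) > (k : Int) + dist := by rw [abs_le] at habs; omega
          rw [hmerge, P_cons team j' hlt, if_pos hz, mergeB_cons]
          rw [if_neg (show ¬ ((j' : Int) < (k : Int) - dist) by omega)]
          rw [if_pos hfar]
          rw [hcast, loopA_eq team dist (k + 1) j' ans, P_cons team j' hlt, if_pos hz]
      · rw [if_neg (show ¬ (j' < team.length ∧ |(k : Int) - (j' : Int)| ≤ dist) from fun hh => absurd hh.1 hlt)]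
        rw [hcast, loopA_eq team dist (k + 1) j' ans, hmerge,
          P_end team j' (le_of_not_gt hlt), mergeB_nil_left, mergeB_nil_left]
  · rw [List.drop_eq_nil_of_le (by omega), loopA]
    unfold C
    rw [List.drop_eq_nil_of_le (by omega)]
    rw [ctchAux, mergeB_nil_right]
    ring
termination_by team.length - k

-- ===== B-side lemmas =====

theorem mem_P (team : List Int) (j : Nat) (e : Int) (he : e ∈ P team j) : (j : Int) ≤ e := by
  have : ∀ (l : List Int) (s : Int) (e : Int), e ∈ pplAux l s → s ≤ e := by
    intro l
    induction l with
    | nil => intro s e h; simp [pplAux] at h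
    | cons x t ih =>
      intro s e h
      unfold pplAux at h
      split at h
      · rcases List.mem_cons.1 h with h | h
        · omega
        · have := ih (s + 1) e h; omega
      · have := ih (s + 1) e h; omega
  exact this _ _ _ he

theorem mem_C (team : List Int) (k : Nat) (e : Int) (he : e ∈ C team k) : (k : Int) ≤ e := by
  have : ∀ (l : List Int) (s : Int) (e : Int), e ∈ ctchAux l s → s ≤ e := by
    intro l
    induction l with
    | nil => intro s e h; simp [ctchAux] at h
    | cons x t ih =>
      intro s e h
      unfold ctchAux at h
      split at h
      · rcases List.mem_cons.1 h with h | h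
        · omega
        · have := ih (s + 1) e h; omega
      · have := ih (s + 1) e h; omega
  exact this _ _ _ he

-- with a negative reach nothing ever matches
theorem mergeB_neg (dist : Int) (hd : dist < 0) (ps cs : List Int) : mergeB dist ps cs = 0 := by
  match ps, cs with
  | [], _ => exact mergeB_nil_left dist _
  | _ :: _, [] => exact mergeB_nil_right dist _
  | q :: ps', c :: cs' =>
    rw [mergeB_cons]
    by_cases h1 : q < c - dist
    · rw [if_pos h1]; exact mergeB_neg dist hd ps' (c :: cs')
    · rw [if_neg h1, if_pos (by omega)]; exact mergeB_neg dist hd (q :: ps') cs'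
termination_by ps.length + cs.length

-- a catcher out of reach of every remaining person is skipped by the merge
theorem mergeB_skip_catcher (dist h : Int) (ps cs : List Int)
    (hall : ∀ p ∈ ps, h + dist < p) : mergeB dist ps (h :: cs) = mergeB dist ps cs := by
  by_cases hd : dist < 0
  · rw [mergeB_neg dist hd, mergeB_neg dist hd]
  · cases ps with
    | nil => rw [mergeB_nil_left, mergeB_nil_left]
    | cons p ps' =>
      have hp := hall p (List.mem_cons_self ..)
      rw [mergeB_cons, if_neg (by omega), if_pos (by omega)]

-- a person out of reach of every remaining catcher is skipped by the merge
theorem mergeB_skip_person (dist h : Int) (ps cs : List Int)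
    (hall : ∀ c ∈ cs, h < c - dist) : mergeB dist (h :: ps) cs = mergeB dist ps cs := by
  cases cs with
  | nil => rw [mergeB_nil_right, mergeB_nil_right]
  | cons c cs' =>
    have hc := hall c (List.mem_cons_self ..)
    rw [mergeB_cons, if_pos hc]

theorem dropExpired_subset (q : List Int) (lim : Int) (e : Int)
    (he : e ∈ dropExpired q lim) : e ∈ q := by
  induction q with
  | nil => simpa [dropExpired] using he
  | cons h t ih =>
    unfold dropExpired at he
    split at he
    · exact List.mem_cons_of_mem _ (ih he)
    · exact he

theorem dropExpired_head (q : List Int) (lim : Int) (h : Int) (t : List Int)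
    (he : dropExpired q lim = h :: t) : lim ≤ h := by
  induction q with
  | nil => simp [dropExpired] at he
  | cons a b ih =>
    unfold dropExpired at he
    split at he
    · exact ih he
    · rename_i hge
      cases he
      omega

-- expiring catchers does not change the merge against people all ≥ k
theorem expire_catchers (team : List Int) (dist : Int) (k : Nat) (q : List Int)
    (hq : ∀ h ∈ q, h < (k : Int)) :
    mergeB dist (P team k) (q ++ C team k)
      = mergeB dist (P team k) (dropExpired q ((k : Int) - dist) ++ C team k) := by
  induction q with
  | nil => rw [dropExpired]
  | cons h t ih =>
    unfold dropExpired
    split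
    · rename_i hexp
      rw [← ih (fun e he => hq e (List.mem_cons_of_mem _ he)), List.cons_append,
        mergeB_skip_catcher dist h _ _ (fun p hp => by have := mem_P team k p hp; omega)]
    · rfl

-- expiring people does not change the merge against catchers all ≥ k
theorem expire_people (team : List Int) (dist : Int) (k : Nat) (q : List Int)
    (hq : ∀ h ∈ q, h < (k : Int)) :
    mergeB dist (q ++ P team k) (C team k)
      = mergeB dist (dropExpired q ((k : Int) - dist) ++ P team k) (C team k) := by
  induction q with
  | nil => rw [dropExpired]
  | cons h t ih =>
    unfold dropExpired
    split
    · rename_i hexp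
      rw [← ih (fun e he => hq e (List.mem_cons_of_mem _ he)), List.cons_append,
        mergeB_skip_person dist h _ _ (fun c hc => by have := mem_C team k c hc; omega)]
    · rfl

theorem loopB_cons_nil (dist x i cnt : Int) (rest pend : List Int) (kd : Bool)
    (h : dropExpired pend (i - dist) = []) :
    loopB dist (x :: rest) i cnt pend kd = loopB dist rest (i + 1) cnt [i] (x != 0) := by
  rw [loopB, h]

theorem loopB_cons_cons (dist x i cnt : Int) (rest pend : List Int) (kd : Bool)
    (hd : Int) (t : List Int) (h : dropExpired pend (i - dist) = hd :: t) :
    loopB dist (x :: rest) i cnt pend kd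
      = if (x != 0) ≠ kd then loopB dist rest (i + 1) (cnt + 1) t kd
        else loopB dist rest (i + 1) cnt ((hd :: t) ++ [i]) kd := by
  rw [loopB, h]

-- B-side invariant: the pass from index k with pending queue q (of kind kd) equals
-- cnt plus the merge count with q prepended on its side
theorem loopB_eq (team : List Int) (dist : Int) (k : Nat) (cnt : Int) (q : List Int) (kd : Bool)
    (hq : ∀ h ∈ q, h < (k : Int)) :
    loopB dist (team.drop k) (k : Int) cnt q kd
      = cnt + (if kd then mergeB dist (P team k) (q ++ C team k)
               else mergeB dist (q ++ P team k) (C team k)) := by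
  have hcast : ((k : Int) + 1) = ((k + 1 : Nat) : Int) := by push_cast; ring
  by_cases h : k < team.length
  · rw [List.drop_eq_getElem_cons h]
    have hg : team[k] = team.getD k 0 := (List.getD_eq_getElem team 0 h).symm
    have hexp0 := expire_people team dist k q hq
    have hexp1 := expire_catchers team dist k q hq
    rw [hg]
    cases hm : dropExpired q ((k : Int) - dist) with
    | nil =>
      rw [loopB_cons_nil dist _ _ cnt _ q kd hm, hcast,
        loopB_eq team dist (k + 1) cnt [(k : Int)] (team.getD k 0 != 0)
          (by intro e he; simp at he; subst he; push_cast; omega)]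
      rw [hm] at hexp0 hexp1
      simp only [List.nil_append] at hexp0 hexp1
      by_cases hx : team.getD k 0 = 0
      · have hb : (team.getD k 0 != 0) = false := by rw [hx]; decide
        rw [hb]
        simp only [Bool.false_eq_true, if_false, List.singleton_append]
        cases kd with
        | true =>
          rw [if_pos rfl, hexp1, P_cons team k h, if_pos hx, C_cons team k h,
            if_neg (fun hh => hh hx)]
        | false =>
          rw [if_neg (by simp), hexp0, P_cons team k h, if_pos hx, C_cons team k h,
            if_neg (fun hh => hh hx)]
      · have hb : (team.getD k 0 != 0) = true := by simp only [bne_iff_ne, ne_eq]; exact hx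
        rw [hb]
        simp only [if_true, List.singleton_append]
        cases kd with
        | true =>
          rw [if_pos rfl, hexp1, P_cons team k h, if_neg hx, C_cons team k h, if_pos hx]
        | false =>
          rw [if_neg (by simp), hexp0, P_cons team k h, if_neg hx, C_cons team k h, if_pos hx]
    | cons hd t =>
      have hq'mem : ∀ e ∈ hd :: t, e < (k : Int) := by
        intro e he
        exact hq e (dropExpired_subset q _ e (hm ▸ he))
      have hq'next : ∀ e ∈ hd :: t, e < ((k + 1 : Nat) : Int) := fun e he => by
        have := hq'mem e he; push_cast; omega
      have hhd_lt : hd < (k : Int) := hq'mem hd (List.mem_cons_self ..)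
      have hhd_ge : (k : Int) - dist ≤ hd := dropExpired_head q _ hd t hm
      rw [hm] at hexp0 hexp1
      rw [loopB_cons_cons dist _ _ cnt _ q kd hd t hm]
      by_cases hne : ((team.getD k 0 != 0) ≠ kd)
      · rw [if_pos hne, hcast,
          loopB_eq team dist (k + 1) (cnt + 1) t kd
            (fun e he => hq'next e (List.mem_cons_of_mem _ he))]
        cases kd with
        | true =>
          -- pending catchers, current is a person
          have hx : team.getD k 0 = 0 := by
            by_contra hx0
            exact hne (by simp only [bne_iff_ne, ne_eq]; exact hx0)
          rw [if_pos rfl, if_pos rfl, hexp1, P_cons team k h, if_pos hx, C_cons team k h,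
            if_neg (fun hh => hh hx), List.cons_append, mergeB_cons,
            if_neg (show ¬ ((k : Int) < hd - dist) by omega),
            if_neg (show ¬ ((k : Int) > hd + dist) by omega)]
          ring
        | false =>
          -- pending people, current is a catcher
          have hx : team.getD k 0 ≠ 0 := by
            intro hx0
            exact hne (by rw [hx0]; decide)
          rw [if_neg (by simp), if_neg (by simp), hexp0, P_cons team k h, if_neg hx,
            C_cons team k h, if_pos hx, List.cons_append, mergeB_cons,
            if_neg (show ¬ (hd < (k : Int) - dist) by omega),
            if_neg (show ¬ (hd > (k : Int) + dist) by omega)]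
          ring
      · rw [if_neg hne, hcast,
          loopB_eq team dist (k + 1) cnt ((hd :: t) ++ [(k : Int)]) kd
            (by
              intro e he
              rcases List.mem_append.1 he with he | he
              · exact hq'next e he
              · simp at he; subst he; push_cast; omega)]
        rw [not_not] at hne
        cases kd with
        | true =>
          have hx : team.getD k 0 ≠ 0 := by
            intro hx0; rw [hx0] at hne; simp at hne
          rw [if_pos rfl, if_pos rfl, hexp1, P_cons team k h, if_neg hx,
            C_cons team k h, if_pos hx]
          simp only [List.append_assoc, List.cons_append, List.nil_append]
        | false =>
          have hx : team.getD k 0 = 0 := by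
            by_contra hx0
            rw [bne_eq_false_iff_eq] at hne
            exact hx0 hne
          rw [if_neg (by simp), if_neg (by simp), hexp0, P_cons team k h, if_pos hx,
            C_cons team k h, if_neg (fun hh => hh hx)]
          simp only [List.append_assoc, List.cons_append, List.nil_append]
  · rw [List.drop_eq_nil_of_le (by omega), loopB,
      P_end team k (by omega), C_end team k (by omega)]
    cases kd <;> simp [mergeB_nil_left, mergeB_nil_right]
termination_by team.length - k

-- ===== VERDICT (by name: the statement is the Claim_ definition above) =====
theorem catchMaximumAmountofPeople_spec : Claim_equal_catchMaximumAmountofPeople := by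
  intro team dist _
  unfold Spec_catchMaximumAmountofPeople catchMaximumAmountofPeople catchMaximumAmountofPeople_alt
  have hA := loopA_eq team dist 0 0 0
  have hB := loopB_eq team dist 0 0 [] false (by intro h hh; simp at hh)
  simp only [List.drop_zero, Nat.cast_zero] at hA hB
  rw [hA, hB]
  simp
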